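-- pv_equiv track=rewrite | github.com/bavalpey/codefights | core/wellOfIntegration/timedReading.py | timedReading
-- ===== SOURCE A (Python) =====
-- def timedReading(maxLength, text):
--     count = 0
--     newtxt = ""
--     for char in text:
--         if char.isalpha():
--             newtxt += char
--         elif char == " ":
--             newtxt += char
--     for i in newtxt.split(" "):
--         if len(i) <= maxLength and len(i) != 0:
--             count += 1
--     return count
-- ===== SOURCE B (Python) =====
-- def timedReading(maxLength, text):
--     count = 0
--     cur = 0
--     for ch in text:
--         if ch.isalpha():
--             cur += 1
--         elif ch == " ":
--             if 0 < cur <= maxLength: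
--                 count += 1
--             cur = 0
--     if 0 < cur <= maxLength:
--         count += 1
--     return count
-- ===== Notes on version B (the rewrite author's own statement) =====
-- stated objective: simpler
-- what changed: Single streaming pass keeping only an integer run-length and a counter, instead of building a filtered string and then splitting it into a token list.
import Mathlib
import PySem

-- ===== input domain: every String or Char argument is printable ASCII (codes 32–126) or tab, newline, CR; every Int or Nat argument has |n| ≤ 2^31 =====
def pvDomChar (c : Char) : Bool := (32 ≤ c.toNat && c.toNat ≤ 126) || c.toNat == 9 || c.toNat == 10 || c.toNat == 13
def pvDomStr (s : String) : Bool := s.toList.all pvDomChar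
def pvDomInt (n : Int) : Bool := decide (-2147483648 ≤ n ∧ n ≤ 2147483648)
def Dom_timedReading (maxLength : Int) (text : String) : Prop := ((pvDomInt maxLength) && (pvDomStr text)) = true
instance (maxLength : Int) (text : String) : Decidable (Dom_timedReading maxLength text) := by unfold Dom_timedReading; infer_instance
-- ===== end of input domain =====

-- B streams over the text once keeping only the current run-length of letters and a counter,
-- instead of building a filtered string and splitting it into a token list (objective: simpler).


-- ===== PORT A =====
def timedReading (maxLength : Int) (text : String) : Int :=
  let newtxt : List Char := text.toList.foldl
    (fun nt char =>
      if PySem.Chars.isalpha char then nt ++ [char]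
      else if char = ' ' then nt ++ [char]
      else nt) []
  (PySem.Chars.splitOn newtxt [' ']).foldl
    (fun count i => if (i.length : Int) ≤ maxLength ∧ i.length ≠ 0 then count + 1 else count) 0

-- ===== PORT B =====
def timedReading_alt (maxLength : Int) (text : String) : Int :=
  let s : Int × Int := text.toList.foldl
    (fun (s : Int × Int) ch =>
      if PySem.Chars.isalpha ch then (s.1, s.2 + 1)
      else if ch = ' ' then ((if 0 < s.2 ∧ s.2 ≤ maxLength then s.1 + 1 else s.1), 0)
      else s) (0, 0)
  if 0 < s.2 ∧ s.2 ≤ maxLength then s.1 + 1 else s.1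

-- ===== PRECONDITION & SPEC =====
def Spec_timedReading (maxLength : Int) (text : String) (out : Int) : Prop := out = timedReading_alt maxLength text
instance (maxLength : Int) (text : String) (out : Int) : Decidable (Spec_timedReading maxLength text out) := by unfold Spec_timedReading; infer_instance

-- ===== CLAIM (what is proved, stated in full; the proofs are below) =====
def Claim_equal_timedReading : Prop := ∀ (maxLength : Int) (text : String), Dom_timedReading maxLength text → Spec_timedReading maxLength text (timedReading maxLength text)

-- ===== LEMMAS AND PROOFS =====

-- the filter A's first loop computes
def pvFilt (l : List Char) : List Char :=
  l.filter (fun c => PySem.Chars.isalpha c || c == ' ')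

-- reference recursion for splitting on a single space, carrying the pending token
def pvSplit (pre : List Char) : List Char → List (List Char)
  | [] => [pre]
  | c :: rest => if c = ' ' then pre :: pvSplit [] rest else pvSplit (pre ++ [c]) rest

-- B's final check, as a function of the loop state
def pvFin (m : Int) (s : Int × Int) : Int := if 0 < s.2 ∧ s.2 ≤ m then s.1 + 1 else s.1

lemma pvGo_spec (fuel : Nat) (l cur : List Char) (acc : List (List Char))
    (h : l.length < fuel) :
    PySem.Chars.splitOn.go [' '] fuel l cur acc
      = acc.reverse ++ pvSplit cur.reverse l := by
  induction l generalizing fuel cur acc with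
  | nil =>
      cases fuel with
      | zero => omega
      | succ f => simp [PySem.Chars.splitOn.go, pvSplit]
  | cons c rest ih =>
      cases fuel with
      | zero => omega
      | succ f =>
        by_cases hc : c = ' '
        · subst hc
          simp only [PySem.Chars.splitOn.go, List.isPrefixOf, pvSplit]
          simp [ih f [] (cur.reverse :: acc) (by simpa using Nat.lt_of_succ_lt_succ h)]
        · simp only [PySem.Chars.splitOn.go, List.isPrefixOf]
          have hb : (' ' == c) = false := by simp [Ne.symm hc]
          simp [hb, ih f (c :: cur) acc (by simpa using Nat.lt_of_succ_lt_succ h), pvSplit, hc]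

lemma pvSplitOn_eq (l : List Char) :
    PySem.Chars.splitOn l [' '] = pvSplit [] l := by
  simpa using pvGo_spec (l.length + 1) l [] [] (by omega)

lemma pvFilt_fold (l : List Char) (acc : List Char) :
    l.foldl (fun nt char =>
      if PySem.Chars.isalpha char then nt ++ [char]
      else if char = ' ' then nt ++ [char]
      else nt) acc = acc ++ pvFilt l := by
  induction l generalizing acc with
  | nil => simp [pvFilt]
  | cons c rest ih =>
      by_cases ha : PySem.Chars.isalpha c
      · simp [ih, pvFilt, ha]
      · by_cases hs : c = ' '
        · simp [ih, pvFilt, hs]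
        · simp [ih, pvFilt, ha, hs]

lemma pvMain (m : Int) (l : List Char) (pre : List Char) (count : Int) :
    pvFin m (l.foldl
      (fun (s : Int × Int) ch =>
        if PySem.Chars.isalpha ch then (s.1, s.2 + 1)
        else if ch = ' ' then ((if 0 < s.2 ∧ s.2 ≤ m then s.1 + 1 else s.1), 0)
        else s) (count, (pre.length : Int)))
    = (pvSplit pre (pvFilt l)).foldl
        (fun count i => if (i.length : Int) ≤ m ∧ i.length ≠ 0 then count + 1 else count) count := by
  induction l generalizing pre count with
  | nil =>
      simp only [List.foldl_nil, pvFilt, List.filter_nil, pvSplit, List.foldl_cons, pvFin]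
      split_ifs <;> omega
  | cons c rest ih =>
      by_cases ha : PySem.Chars.isalpha c
      · have hc : c ≠ ' ' := by
          intro hc; subst hc; exact absurd ha (by decide)
        have hfilt : pvFilt (c :: rest) = c :: pvFilt rest := by
          simp [pvFilt, ha]
        rw [List.foldl_cons, if_pos ha, hfilt]
        simp only [pvSplit, if_neg hc]
        have hlen : ((pre.length : Int) + 1) = (((pre ++ [c]).length : Nat) : Int) := by
          simp
        rw [show ((count, (pre.length : Int) + 1) : Int × Int)
              = (count, (((pre ++ [c]).length : Nat) : Int)) by rw [hlen]]
        exact ih (pre ++ [c]) count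
      · by_cases hs : c = ' '
        · subst hs
          have hfilt : pvFilt (' ' :: rest) = ' ' :: pvFilt rest := by
            simp [pvFilt]
          have hsplit : pvSplit pre (' ' :: pvFilt rest) = pre :: pvSplit [] (pvFilt rest) := by
            simp [pvSplit]
          rw [List.foldl_cons, if_neg (by simp [ha]), if_pos rfl, hfilt, hsplit, List.foldl_cons]
          have hcond : (if 0 < (pre.length : Int) ∧ (pre.length : Int) ≤ m then count + 1 else count)
              = (if (pre.length : Int) ≤ m ∧ pre.length ≠ 0 then count + 1 else count) := by
            split_ifs <;> omega
          rw [hcond]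
          exact ih [] _
        · have hfilt : pvFilt (c :: rest) = pvFilt rest := by
            simp [pvFilt, ha, hs]
          rw [List.foldl_cons, if_neg (by simp [ha]), if_neg hs, hfilt]
          exact ih pre count

-- ===== VERDICT (by name: the statement is the Claim_ definition above) =====
theorem timedReading_spec : Claim_equal_timedReading := by
  intro maxLength text _
  unfold Spec_timedReading timedReading timedReading_alt
  simp only [pvFilt_fold, pvSplitOn_eq, List.nil_append]
  have := pvMain maxLength text.toList [] 0
  simpa [pvFin] using this.symm
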